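-- pv_equiv track=rewrite | github.com/ChakshuGautam/bpai-structura | core/models/transformation_nl.py | build_similarity_lookup
-- ===== SOURCE A (Python) =====
-- def build_similarity_lookup(groups):
--     lookup = {}
--     for key, vals in groups.items():
--         group = [key] + vals
--         for char in group:
--             if char not in lookup:
--                 lookup[char] = []
--             lookup[char].extend([c for c in group if c != char and c not in lookup[char]])
--     return lookup
-- ===== SOURCE B (Python) =====
-- def build_similarity_lookup(groups):
--     group_lists = [[key] + vals for key, vals in groups.items()]
--     # inverted index: char -> indices of the groups containing it, in order
--     occ = {}
--     for i, g in enumerate(group_lists):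
--         for ch in g:
--             if ch not in occ:
--                 occ[ch] = []
--             if not occ[ch] or occ[ch][-1] != i:
--                 occ[ch].append(i)
--     lookup = {}
--     for ch, idxs in occ.items():
--         neigh = []
--         seen = {ch}
--         for i in idxs:
--             new = [c for c in group_lists[i] if c not in seen]
--             neigh += new
--             seen.update(new)
--         lookup[ch] = neigh
--     return lookup
-- ===== Notes on version B (the rewrite author's own statement) =====
-- stated objective: faster
-- what changed: B first builds an inverted index mapping each character to the ordered list of groups containing it, then assembles every neighbor list in one indexed pass with hash-set dedup, instead of A's single forward pass that mutates dict entries in place with linear 'not in' rescans.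
import Mathlib
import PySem

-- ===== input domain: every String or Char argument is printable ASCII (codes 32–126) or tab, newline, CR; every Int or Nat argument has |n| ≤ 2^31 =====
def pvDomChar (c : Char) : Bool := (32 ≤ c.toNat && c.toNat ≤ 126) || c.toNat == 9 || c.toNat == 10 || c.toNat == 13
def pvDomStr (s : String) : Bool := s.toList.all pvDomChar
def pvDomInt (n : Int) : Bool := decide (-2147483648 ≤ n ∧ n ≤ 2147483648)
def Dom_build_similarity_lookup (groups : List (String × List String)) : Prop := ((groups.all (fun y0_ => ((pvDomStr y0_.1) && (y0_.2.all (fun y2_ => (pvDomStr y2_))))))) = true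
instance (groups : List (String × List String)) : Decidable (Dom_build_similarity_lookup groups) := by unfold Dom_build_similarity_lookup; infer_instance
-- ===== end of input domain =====

-- B builds an inverted index (char -> indices of groups containing it) first, then assembles each
-- neighbor list once per character with set-based dedup, instead of A's single pass that mutates dict
-- entries with linear `not in` rescans.

-- ===== PORT A =====
def build_similarity_lookup (groups : List (String × List String)) : List (String × List String) :=
  (groups.foldl (fun lookup kv =>
      let group := [kv.1] ++ kv.2
      group.foldl (fun lookup char =>
        let lookup := if lookup.contains char then lookup else lookup.insert char []
        let cur := lookup.getD char []
        lookup.insert char (cur ++ group.filter (fun c => !(c == char) && !(cur.contains c))))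
        lookup)
    (PySem.Dict.empty : PySem.Dict String (List String))).items

-- ===== PORT B =====
def bslGroupLists (groups : List (String × List String)) : List (List String) :=
  groups.map (fun kv => [kv.1] ++ kv.2)

-- inverted index: char -> indices of the groups containing it, in order
def bslOcc (groups : List (String × List String)) : PySem.Dict String (List Int) :=
  (PySem.List.enumerate (bslGroupLists groups)).foldl (fun occ ig =>
    ig.2.foldl (fun occ ch =>
      let occ := if occ.contains ch then occ else occ.insert ch []
      let l := occ.getD ch []
      -- Python `if not occ[ch] or occ[ch][-1] != i`; `l[-1]` on the nonempty l is `l.getLast?`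
      if l.isEmpty || l.getLast? != some ig.1 then occ.insert ch (l ++ [ig.1]) else occ) occ)
    PySem.Dict.empty

-- one character's neighbor list, gathered from the groups its index points at
def bslGather (gl : List (List String)) (ch : String) (idxs : List Int) : List String :=
  (idxs.foldl (fun ns i =>
      let new := (PySem.List.pyGetD gl i []).filter (fun c => !(ns.2.contains c))
      (ns.1 ++ new, PySem.Set.update ns.2 new))
    (([] : List String), (PySem.Set.ofList [ch] : PySem.Set String))).1

def build_similarity_lookup_alt (groups : List (String × List String)) : List (String × List String) :=
  ((bslOcc groups).items.foldl
    (fun lookup p => lookup.insert p.1 (bslGather (bslGroupLists groups) p.1 p.2))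
    (PySem.Dict.empty : PySem.Dict String (List String))).items

-- ===== PRECONDITION & SPEC =====
def Spec_build_similarity_lookup (groups : List (String × List String)) (out : List (String × List String)) : Prop := out = build_similarity_lookup_alt groups
instance (groups : List (String × List String)) (out : List (String × List String)) : Decidable (Spec_build_similarity_lookup groups out) := by unfold Spec_build_similarity_lookup; infer_instance

-- ===== CLAIM (what is proved, stated in full; the proofs are below) =====
def Claim_equal_build_similarity_lookup : Prop := ∀ (groups : List (String × List String)), Dom_build_similarity_lookup groups → Spec_build_similarity_lookup groups (build_similarity_lookup groups)

-- ===== LEMMAS AND PROOFS =====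

/-- The group lists `[key] + vals`, in dict order. -/
def pvGl (groups : List (String × List String)) : List (List String) :=
  groups.map (fun kv => [kv.1] ++ kv.2)

/-- One iteration of A's inner loop (over `char ∈ group`). -/
def pvStepChar (group : List String) (lookup : PySem.Dict String (List String)) (char : String) :
    PySem.Dict String (List String) :=
  let lookup := if lookup.contains char then lookup else lookup.insert char []
  let cur := lookup.getD char []
  lookup.insert char (cur ++ group.filter (fun c => !(c == char) && !(cur.contains c)))

/-- One iteration of A's outer loop (over groups). -/
def pvStepA (lookup : PySem.Dict String (List String)) (group : List String) :
    PySem.Dict String (List String) :=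
  group.foldl (pvStepChar group) lookup

/-- One iteration of B's neighbor accumulation for character `ch`. -/
def pvNbStep (ch : String) (n : List String) (group : List String) : List String :=
  if group.contains ch then n ++ group.filter (fun c => !(c == ch) && !(n.contains c)) else n

/-- Extending `v` by the new members of `group` (A's comprehension-and-extend, B's batch). -/
def pvExt (group : List String) (ch : String) (v : List String) : List String :=
  v ++ group.filter (fun c => !(c == ch) && !(v.contains c))


theorem pvFilter_ext_nil (group : List String) (ch : String) (v : List String) :
    group.filter (fun c => !(c == ch) && !((pvExt group ch v).contains c)) = [] := by
  rw [List.filter_eq_nil_iff]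
  intro c hc
  by_cases h : c = ch
  · simp [h]
  · have hmem : c ∈ pvExt group ch v := by
      by_cases hv : c ∈ v
      · exact List.mem_append_left _ hv
      · refine List.mem_append_right _ (List.mem_filter.2 ⟨hc, ?_⟩)
        simp [h, hv]
    simp [hmem]

theorem pvExt_ext (group : List String) (ch : String) (v : List String) :
    pvExt group ch (pvExt group ch v) = pvExt group ch v := by
  conv_lhs => rw [pvExt]
  rw [pvFilter_ext_nil, List.append_nil]

theorem pvInner (group : List String) :
    ∀ (rest : List String) (M : List String) (f : String → List String)
      (d : PySem.Dict String (List String)),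
      M.Nodup →
      d.items = M.map (fun ch => (ch, f ch)) →
      (∀ ch, ch ∉ M → f ch = []) →
      (rest.foldl (pvStepChar group) d).items =
        (PySem.Set.update M rest).map
          (fun ch => (ch, if ch ∈ rest then pvExt group ch (f ch) else f ch)) := by
  intro rest
  induction rest with
  | nil =>
    intro M f d hN hI hf
    simpa [PySem.Set.update_nil] using hI
  | cons c rest ih =>
    intro M f d hN hI hf
    have hkeys : d.keys = M := by
      simp [PySem.Dict.keys, hI, List.map_map, Function.comp_def]
    have hNk : d.keys.Nodup := by rw [hkeys]; exact hN
    rw [List.foldl_cons, PySem.Set.update_cons]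
    by_cases hc : c ∈ M
    · -- c already a key: overwrite in place
      have hcont : d.contains c = true := by
        rw [PySem.Dict.contains_eq_decide_mem_keys, hkeys]; simp [hc]
      have hget : d.getD c [] = f c :=
        PySem.Dict.getD_of_mem_items d (by rw [hI]; exact List.mem_map_of_mem hc) hNk []
      have hstep : pvStepChar group d c = d.insert c (pvExt group c (f c)) := by
        simp [pvStepChar, hcont, hget, pvExt]
      have hitems : (pvStepChar group d c).items =
          M.map (fun ch => (ch, if ch = c then pvExt group c (f c) else f ch)) := by
        rw [hstep, PySem.Dict.items_insert_of_contains _ _ hcont, hI, List.map_map]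
        refine List.map_congr_left ?_
        intro ch _
        by_cases h : ch = c <;> simp [h]
      rw [PySem.Set.add_of_mem hc]
      rw [ih M _ (pvStepChar group d c) hN hitems ?hf']
      case hf' =>
        intro ch hch
        have hne : ch ≠ c := fun he => hch (he ▸ hc)
        simp [hne, hf ch hch]
      refine List.map_congr_left ?_
      intro ch _
      by_cases h : ch = c
      · subst h
        by_cases hr : ch ∈ rest <;> simp [hr, pvExt_ext]
      · by_cases hr : ch ∈ rest <;> simp [h, hr]
    · -- c is a fresh key: appended at the end
      have hcont : d.contains c = false := by
        rw [PySem.Dict.contains_eq_decide_mem_keys, hkeys]; simp [hc]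
      have hfc : f c = [] := hf c hc
      have hstep : pvStepChar group d c =
          (d.insert c []).insert c (pvExt group c (f c)) := by
        simp [pvStepChar, hcont, PySem.Dict.getD_insert_self, pvExt, hfc]
      have hitems : (pvStepChar group d c).items =
          (M ++ [c]).map (fun ch => (ch, if ch = c then pvExt group c (f c) else f ch)) := by
        rw [hstep, PySem.Dict.items_insert_of_contains _ _ (PySem.Dict.contains_insert_self _ _ _),
          PySem.Dict.items_insert_of_not_contains _ _ hcont, hI]
        rw [List.map_append, List.map_map, List.map_append]
        congr 1
        · refine List.map_congr_left ?_
          intro ch hch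
          have hne : ch ≠ c := fun he => hc (he ▸ hch)
          simp [hne]
        · simp
      have hN' : (M ++ [c]).Nodup := by
        refine hN.append (List.nodup_singleton c) ?_
        intro a ha hb
        rw [List.mem_singleton] at hb
        exact hc (hb ▸ ha)
      rw [PySem.Set.add_of_not_mem hc]
      rw [ih (M ++ [c]) _ (pvStepChar group d c) hN' hitems ?hf']
      case hf' =>
        intro ch hch
        have h1 : ch ∉ M ∧ ch ≠ c := by simpa using (by simpa [List.mem_append] using hch : ¬(ch ∈ M ∨ ch ∈ [c]))
        simp [h1.2, hf ch h1.1]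
      refine List.map_congr_left ?_
      intro ch _
      by_cases h : ch = c
      · subst h
        by_cases hr : ch ∈ rest <;> simp [hr, pvExt_ext]
      · by_cases hr : ch ∈ rest <;> simp [h, hr]

theorem pvOuter :
    ∀ (P : List (List String)) (M : List String) (f : String → List String)
      (d : PySem.Dict String (List String)),
      M.Nodup →
      d.items = M.map (fun ch => (ch, f ch)) →
      (∀ ch, ch ∉ M → f ch = []) →
      (P.foldl pvStepA d).items =
        (PySem.Set.update M P.flatten).map
          (fun ch => (ch, P.foldl (pvNbStep ch) (f ch))) := by
  intro P
  induction P with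
  | nil =>
    intro M f d hN hI hf
    simpa [PySem.Set.update_nil] using hI
  | cons g P ih =>
    intro M f d hN hI hf
    have hstep : (pvStepA d g).items =
        (PySem.Set.update M g).map
          (fun ch => (ch, if ch ∈ g then pvExt g ch (f ch) else f ch)) :=
      pvInner g g M f d hN hI hf
    have hN' : (PySem.Set.update M g).Nodup := PySem.Set.nodup_update M g hN
    have hf' : ∀ ch, ch ∉ PySem.Set.update M g →
        (if ch ∈ g then pvExt g ch (f ch) else f ch) = [] := by
      intro ch hch
      have h1 : ¬(ch ∈ M ∨ ch ∈ g) := by simpa [PySem.Set.mem_update] using hch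
      push Not at h1
      simp [h1.2, hf ch h1.1]
    rw [List.foldl_cons, ih _ _ _ hN' hstep hf', List.flatten_cons, PySem.Set.update_append]
    refine List.map_congr_left ?_
    intro ch _
    have hval : (if ch ∈ g then pvExt g ch (f ch) else f ch) = pvNbStep ch (f ch) g := by
      by_cases h : ch ∈ g <;> simp [pvNbStep, pvExt, h]
    rw [List.foldl_cons, hval]

theorem pvA_eq (groups : List (String × List String)) :
    build_similarity_lookup groups =
      (PySem.Set.ofList (pvGl groups).flatten).map
        (fun ch => (ch, (pvGl groups).foldl (pvNbStep ch) [])) := by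
  have h1 : build_similarity_lookup groups =
      ((pvGl groups).foldl pvStepA PySem.Dict.empty).items := by
    simp only [build_similarity_lookup, pvGl, List.foldl_map]
    rfl
  rw [h1, pvOuter _ [] (fun _ => []) _ List.nodup_nil (by simp [PySem.Dict.empty])
    (fun _ _ => rfl), PySem.Set.update_nil_left]

/-- `if last(v) == i then v else v ++ [i]` — the effect of B's conditional append. -/
def pvUpdI (i : Int) (v : List Int) : List Int :=
  if v.getLast? == some i then v else v ++ [i]

/-- One iteration of B's inner index-building loop, for group index `i`. -/
def pvOccStepChar (i : Int) (occ : PySem.Dict String (List Int)) (ch : String) :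
    PySem.Dict String (List Int) :=
  let occ := if occ.contains ch then occ else occ.insert ch []
  let l := occ.getD ch []
  if l.isEmpty || l.getLast? != some i then occ.insert ch (l ++ [i]) else occ

/-- One iteration of B's outer index-building loop. -/
def pvOccStepG (occ : PySem.Dict String (List Int)) (ig : Int × List String) :
    PySem.Dict String (List Int) :=
  ig.2.foldl (pvOccStepChar ig.1) occ

/-- Value-level effect of one group on `occ[ch]`. -/
def pvOccVal (ch : String) (l : List Int) (ig : Int × List String) : List Int :=
  if ig.2.contains ch then pvUpdI ig.1 l else l

/-- One iteration of B's gather loop. -/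
def pvGStep (gl : List (List String)) (ns : List String × PySem.Set String) (i : Int) :
    List String × PySem.Set String :=
  let new := (PySem.List.pyGetD gl i []).filter (fun c => !(ns.2.contains c))
  (ns.1 ++ new, PySem.Set.update ns.2 new)

theorem pvUpdI_idem (i : Int) (v : List Int) : pvUpdI i (pvUpdI i v) = pvUpdI i v := by
  unfold pvUpdI
  by_cases h : v.getLast? = some i
  · simp [h]
  · simp [h]

theorem pvOccInner (i : Int) :
    ∀ (rest : List String) (M : List String) (h : String → List Int)
      (d : PySem.Dict String (List Int)),
      M.Nodup →
      d.items = M.map (fun ch => (ch, h ch)) →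
      (∀ ch, ch ∉ M → h ch = []) →
      (rest.foldl (pvOccStepChar i) d).items =
        (PySem.Set.update M rest).map
          (fun ch => (ch, if ch ∈ rest then pvUpdI i (h ch) else h ch)) := by
  intro rest
  induction rest with
  | nil =>
    intro M h d hN hI hf
    simpa [PySem.Set.update_nil] using hI
  | cons c rest ih =>
    intro M h d hN hI hf
    have hkeys : d.keys = M := by
      simp [PySem.Dict.keys, hI, List.map_map, Function.comp_def]
    have hNk : d.keys.Nodup := by rw [hkeys]; exact hN
    rw [List.foldl_cons, PySem.Set.update_cons]
    by_cases hc : c ∈ M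
    · have hcont : d.contains c = true := by
        rw [PySem.Dict.contains_eq_decide_mem_keys, hkeys]; simp [hc]
      have hget : d.getD c [] = h c :=
        PySem.Dict.getD_of_mem_items d (by rw [hI]; exact List.mem_map_of_mem hc) hNk []
      have hitems : (pvOccStepChar i d c).items =
          M.map (fun ch => (ch, if ch = c then pvUpdI i (h ch) else h ch)) := by
        by_cases hlast : (h c).getLast? = some i
        · have hne : (h c).isEmpty = false := by
            cases hhc : h c with
            | nil => rw [hhc] at hlast; simp at hlast
            | cons x xs => simp
          have : pvOccStepChar i d c = d := by
            simp [pvOccStepChar, hcont, hget, hne, hlast]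
          rw [this, hI]
          refine List.map_congr_left ?_
          intro ch _
          by_cases hch : ch = c
          · subst hch; simp [pvUpdI, hlast]
          · simp [hch]
        · have : pvOccStepChar i d c = d.insert c (h c ++ [i]) := by
            by_cases hemp : (h c).isEmpty
            · simp [pvOccStepChar, hcont, hget, hemp]
            · simp [pvOccStepChar, hcont, hget, hemp, hlast]
          rw [this, PySem.Dict.items_insert_of_contains _ _ hcont, hI, List.map_map]
          refine List.map_congr_left ?_
          intro ch _
          by_cases hch : ch = c
          · subst hch; simp [pvUpdI, hlast]
          · simp [hch]
      rw [PySem.Set.add_of_mem hc]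
      rw [ih M _ (pvOccStepChar i d c) hN hitems ?hf']
      case hf' =>
        intro ch hch
        have hne : ch ≠ c := fun he => hch (he ▸ hc)
        simp [hne, hf ch hch]
      refine List.map_congr_left ?_
      intro ch _
      by_cases hch : ch = c
      · subst hch
        by_cases hr : ch ∈ rest <;> simp [hr, pvUpdI_idem]
      · by_cases hr : ch ∈ rest <;> simp [hch, hr]
    · have hcont : d.contains c = false := by
        rw [PySem.Dict.contains_eq_decide_mem_keys, hkeys]; simp [hc]
      have hfc : h c = [] := hf c hc
      have hstep : pvOccStepChar i d c = (d.insert c []).insert c ([] ++ [i]) := by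
        simp [pvOccStepChar, hcont, PySem.Dict.getD_insert_self]
      have hitems : (pvOccStepChar i d c).items =
          (M ++ [c]).map (fun ch => (ch, if ch = c then pvUpdI i (h ch) else h ch)) := by
        rw [hstep, PySem.Dict.items_insert_of_contains _ _ (PySem.Dict.contains_insert_self _ _ _),
          PySem.Dict.items_insert_of_not_contains _ _ hcont, hI]
        rw [List.map_append, List.map_map, List.map_append]
        congr 1
        · refine List.map_congr_left ?_
          intro ch hch
          have hne : ch ≠ c := fun he => hc (he ▸ hch)
          simp [hne]
        · simp [pvUpdI, hfc]
      have hN' : (M ++ [c]).Nodup := by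
        refine hN.append (List.nodup_singleton c) ?_
        intro a ha hb
        rw [List.mem_singleton] at hb
        exact hc (hb ▸ ha)
      rw [PySem.Set.add_of_not_mem hc]
      rw [ih (M ++ [c]) _ (pvOccStepChar i d c) hN' hitems ?hf']
      case hf' =>
        intro ch hch
        have h1 : ch ∉ M ∧ ch ≠ c := by
          simpa using (by simpa [List.mem_append] using hch : ¬(ch ∈ M ∨ ch ∈ [c]))
        simp [h1.2, hf ch h1.1]
      refine List.map_congr_left ?_
      intro ch _
      by_cases hch : ch = c
      · subst hch
        by_cases hr : ch ∈ rest <;> simp [hr, pvUpdI_idem]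
      · by_cases hr : ch ∈ rest <;> simp [hch, hr]

theorem pvOccOuter :
    ∀ (E : List (Int × List String)) (M : List String) (h : String → List Int)
      (d : PySem.Dict String (List Int)),
      M.Nodup →
      d.items = M.map (fun ch => (ch, h ch)) →
      (∀ ch, ch ∉ M → h ch = []) →
      (E.foldl pvOccStepG d).items =
        (PySem.Set.update M (E.map (fun p => p.2)).flatten).map
          (fun ch => (ch, E.foldl (pvOccVal ch) (h ch))) := by
  intro E
  induction E with
  | nil =>
    intro M h d hN hI hf
    simpa [PySem.Set.update_nil] using hI
  | cons p E ih =>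
    intro M h d hN hI hf
    have hstep : (pvOccStepG d p).items =
        (PySem.Set.update M p.2).map
          (fun ch => (ch, if ch ∈ p.2 then pvUpdI p.1 (h ch) else h ch)) :=
      pvOccInner p.1 p.2 M h d hN hI hf
    have hN' : (PySem.Set.update M p.2).Nodup := PySem.Set.nodup_update M p.2 hN
    have hf' : ∀ ch, ch ∉ PySem.Set.update M p.2 →
        (if ch ∈ p.2 then pvUpdI p.1 (h ch) else h ch) = [] := by
      intro ch hch
      have h1 : ¬(ch ∈ M ∨ ch ∈ p.2) := by simpa [PySem.Set.mem_update] using hch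
      push Not at h1
      simp [h1.2, hf ch h1.1]
    rw [List.foldl_cons, ih _ _ _ hN' hstep hf', List.map_cons, List.flatten_cons,
      PySem.Set.update_append]
    refine List.map_congr_left ?_
    intro ch _
    have hval : (if ch ∈ p.2 then pvUpdI p.1 (h ch) else h ch) = pvOccVal ch (h ch) p := by
      by_cases hm : ch ∈ p.2 <;> simp [pvOccVal, hm]
    rw [List.foldl_cons, hval]

theorem pvIdxFold (ch : String) :
    ∀ (E : List (Int × List String)) (acc : List Int),
      (∀ j ∈ acc, ∀ p ∈ E, j < p.1) →
      E.Pairwise (fun p q => p.1 < q.1) →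
      E.foldl (pvOccVal ch) acc = acc ++ (E.filter (fun p => p.2.contains ch)).map (fun p => p.1) := by
  intro E
  induction E with
  | nil => intro acc _ _; simp
  | cons p E ih =>
    intro acc hacc hpw
    rw [List.pairwise_cons] at hpw
    rw [List.foldl_cons]
    by_cases hc : p.2.contains ch = true
    · have hlast : acc.getLast? ≠ some p.1 := by
        intro hl
        have := hacc p.1 (List.mem_of_getLast? hl) p (List.mem_cons_self ..)
        omega
      have hstep : pvOccVal ch acc p = acc ++ [p.1] := by
        unfold pvOccVal pvUpdI
        rw [if_pos hc, if_neg (by simpa using hlast)]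
      have hacc' : ∀ j ∈ acc ++ [p.1], ∀ q ∈ E, j < q.1 := by
        intro j hj q hq
        rcases List.mem_append.1 hj with hj | hj
        · exact lt_trans (hacc j hj p (List.mem_cons_self ..)) (hpw.1 q hq)
        · rw [List.mem_singleton] at hj
          exact hj ▸ hpw.1 q hq
      rw [hstep, ih (acc ++ [p.1]) hacc' hpw.2]
      have hfc : List.filter (fun q => q.2.contains ch) (p :: E) =
          p :: List.filter (fun q => q.2.contains ch) E := by
        simp only [List.filter_cons, hc, if_true]
      rw [hfc, List.map_cons]
      simp
    · have hstep : pvOccVal ch acc p = acc := by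
        unfold pvOccVal
        rw [if_neg (by simpa using hc)]
      have hacc' : ∀ j ∈ acc, ∀ q ∈ E, j < q.1 :=
        fun j hj q hq => hacc j hj q (List.mem_cons_of_mem _ hq)
      have hfc : List.filter (fun q => q.2.contains ch) (p :: E) =
          List.filter (fun q => q.2.contains ch) E := by
        have hc' : p.2.contains ch = false := by simpa using hc
        simp only [List.filter_cons, hc', Bool.false_eq_true, if_false]
      rw [hstep, ih acc hacc' hpw.2, hfc]

theorem pvGatherEq (gl : List (List String)) (ch : String) :
    ∀ (E : List (Int × List String)) (n : List String) (s : PySem.Set String),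
      (∀ p ∈ E, PySem.List.pyGetD gl p.1 [] = p.2) →
      (∀ c, c ∈ s ↔ (c = ch ∨ c ∈ n)) →
      (((E.filter (fun p => p.2.contains ch)).map (fun p => p.1)).foldl (pvGStep gl) (n, s)).1 =
        (E.map (fun p => p.2)).foldl (pvNbStep ch) n := by
  intro E
  induction E with
  | nil => intro n s _ _; simp
  | cons p E ih =>
    intro n s hp hs
    have hpe : ∀ q ∈ E, PySem.List.pyGetD gl q.1 [] = q.2 :=
      fun q hq => hp q (List.mem_cons_of_mem _ hq)
    by_cases hc : p.2.contains ch = true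
    · have hfc : List.filter (fun q => q.2.contains ch) (p :: E) =
          p :: List.filter (fun q => q.2.contains ch) E := by
        simp only [List.filter_cons, hc, if_true]
      rw [hfc, List.map_cons, List.foldl_cons, List.map_cons, List.foldl_cons]
      have hnew : (PySem.List.pyGetD gl p.1 []).filter (fun c => !(s.contains c)) =
          p.2.filter (fun c => !(c == ch) && !(n.contains c)) := by
        rw [hp p (List.mem_cons_self ..)]
        refine List.filter_congr ?_
        intro c _
        by_cases h1 : c ∈ s
        · rcases (hs c).1 h1 with h2 | h2
          · subst h2
            simp [h1]
          · simp [h1, h2]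
        · have h2 : ¬(c = ch) := fun e => h1 ((hs c).2 (Or.inl e))
          have h3 : c ∉ n := fun e => h1 ((hs c).2 (Or.inr e))
          simp [h1, h2, h3]
      have hstep : pvGStep gl (n, s) p.1 =
          (n ++ p.2.filter (fun c => !(c == ch) && !(n.contains c)),
            PySem.Set.update s ((PySem.List.pyGetD gl p.1 []).filter (fun c => !(s.contains c)))) := by
        simp only [pvGStep, hnew]
      rw [hstep]
      have hs' : ∀ c, c ∈ PySem.Set.update s
          ((PySem.List.pyGetD gl p.1 []).filter (fun c => !(s.contains c))) ↔
          (c = ch ∨ c ∈ n ++ p.2.filter (fun c => !(c == ch) && !(n.contains c))) := by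
        intro c
        rw [PySem.Set.mem_update, hnew, hs c, List.mem_append]
        tauto
      rw [ih _ _ hpe hs']
      have : pvNbStep ch n p.2 = n ++ p.2.filter (fun c => !(c == ch) && !(n.contains c)) := by
        unfold pvNbStep
        rw [if_pos hc]
      rw [this]
    · have hfc : List.filter (fun q => q.2.contains ch) (p :: E) =
          List.filter (fun q => q.2.contains ch) E := by
        have hc' : p.2.contains ch = false := by simpa using hc
        simp only [List.filter_cons, hc', Bool.false_eq_true, if_false]
      rw [hfc, List.map_cons, List.foldl_cons]
      have : pvNbStep ch n p.2 = n := by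
        unfold pvNbStep
        rw [if_neg (by simpa using hc)]
      rw [this, ih _ _ hpe hs]

theorem pvB_eq (groups : List (String × List String)) :
    build_similarity_lookup_alt groups =
      (PySem.Set.ofList (pvGl groups).flatten).map
        (fun ch => (ch, (pvGl groups).foldl (pvNbStep ch) [])) := by
  have hgl : bslGroupLists groups = pvGl groups := rfl
  have hoccdef : bslOcc groups =
      (PySem.List.enumerate (pvGl groups)).foldl pvOccStepG PySem.Dict.empty := rfl
  have hocc : (bslOcc groups).items =
      (PySem.Set.ofList (pvGl groups).flatten).map
        (fun ch => (ch, ((PySem.List.enumerate (pvGl groups)).filter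
          (fun p => p.2.contains ch)).map (fun p => p.1))) := by
    rw [hoccdef, pvOccOuter (PySem.List.enumerate (pvGl groups)) [] (fun _ => [])
      PySem.Dict.empty List.nodup_nil rfl (fun _ _ => rfl)]
    rw [PySem.List.map_snd_enumerate, PySem.Set.update_nil_left]
    refine List.map_congr_left ?_
    intro ch _
    rw [pvIdxFold ch _ [] (by simp) (PySem.List.pairwise_lt_enumerate _ _), List.nil_append]
  have hnodup : (PySem.Set.ofList (pvGl groups).flatten).Nodup := PySem.Set.nodup_ofList _
  have hnodupmap : ((bslOcc groups).items.map (fun p => p.1)).Nodup := by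
    rw [hocc, List.map_map]
    simp [Function.comp_def, hnodup]
  have hfresh := PySem.Dict.items_foldl_insert_fresh (bslOcc groups).items (fun p => p.1)
    (fun p => bslGather (bslGroupLists groups) p.1 p.2)
    (PySem.Dict.empty : PySem.Dict String (List String))
    (fun a _ => PySem.Dict.contains_empty _) hnodupmap
  unfold build_similarity_lookup_alt
  rw [hfresh]
  have hempty : (PySem.Dict.empty : PySem.Dict String (List String)).items = [] := rfl
  rw [hempty, List.nil_append, hocc, List.map_map]
  refine List.map_congr_left ?_
  intro ch _
  simp only [Function.comp_def]
  congr 1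
  have hgather : bslGather (bslGroupLists groups) ch
      (((PySem.List.enumerate (pvGl groups)).filter (fun p => p.2.contains ch)).map (fun p => p.1)) =
      ((((PySem.List.enumerate (pvGl groups)).filter (fun p => p.2.contains ch)).map
        (fun p => p.1)).foldl (pvGStep (pvGl groups)) ([], PySem.Set.ofList [ch])).1 := rfl
  rw [hgather]
  rw [pvGatherEq (pvGl groups) ch (PySem.List.enumerate (pvGl groups)) [] (PySem.Set.ofList [ch])
    ?hp ?hs]
  · rw [PySem.List.map_snd_enumerate]
  case hp =>
    intro p hp
    rw [PySem.List.mem_enumerate_iff] at hp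
    obtain ⟨k, hk, rfl⟩ := hp
    simp [PySem.List.pyGetD_natCast, List.getD_eq_getElem?_getD, hk]
  case hs =>
    intro c
    simp [PySem.Set.mem_ofList]

-- ===== VERDICT (by name: the statement is the Claim_ definition above) =====
theorem build_similarity_lookup_spec : Claim_equal_build_similarity_lookup := by
  intro groups _
  unfold Spec_build_similarity_lookup
  rw [pvA_eq, pvB_eq]
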